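-- pv_equiv track=rewrite | github.com/Sujabaral/ai-resume-screener | utils/domain_classifier.py | _count_keyword_hits
-- ===== SOURCE A (Python) =====
-- def _count_keyword_hits(text, keywords):
--     """
--     Count keyword hits in text.
--     Uses phrase-aware matching.
--     """
--     if not text or not keywords:
--         return 0
--
--     score = 0
--     for keyword in keywords:
--         keyword = keyword.strip().lower()
--         if not keyword:
--             continue
--
--         # phrase / substring match
--         if keyword in text:
--             score += 1
--
--     return score
-- ===== SOURCE B (Python) =====
-- def _count_keyword_hits(text, keywords):
--     if not text or not keywords:
--         return 0
--     counts = {}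
--     for kw in keywords:
--         k = kw.strip().lower()
--         if k:
--             counts[k] = counts.get(k, 0) + 1
--     return sum(c for k, c in counts.items() if k in text)
-- ===== Notes on version B (the rewrite author's own statement) =====
-- stated objective: alternative
-- what changed: B replaces A's per-keyword accumulator loop by first grouping the normalized keywords into a dict of multiplicities, then running the substring test once per DISTINCT normalized keyword and summing multiplicities, so duplicate keywords trigger only one scan of the text.
import Mathlib
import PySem

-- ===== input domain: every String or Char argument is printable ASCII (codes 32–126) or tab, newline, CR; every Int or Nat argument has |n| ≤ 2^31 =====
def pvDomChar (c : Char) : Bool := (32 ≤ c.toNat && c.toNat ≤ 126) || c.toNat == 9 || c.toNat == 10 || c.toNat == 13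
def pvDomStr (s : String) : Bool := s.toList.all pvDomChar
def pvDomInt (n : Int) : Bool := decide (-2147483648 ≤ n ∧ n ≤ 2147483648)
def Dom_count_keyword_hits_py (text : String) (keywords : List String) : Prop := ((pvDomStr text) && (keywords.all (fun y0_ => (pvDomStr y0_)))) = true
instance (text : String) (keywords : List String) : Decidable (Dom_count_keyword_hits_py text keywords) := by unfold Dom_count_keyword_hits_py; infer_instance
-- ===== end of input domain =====

-- B groups normalized keywords into a multiplicity dict and tests each distinct one once; alternative structure, same values.


-- ===== PORT A =====
def count_keyword_hits_py (text : String) (keywords : List String) : Int :=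
  if text = "" ∨ keywords = [] then 0
  else
    keywords.foldl (fun score keyword =>
      let k := PySem.Str.lower (PySem.Str.strip keyword)
      if k = "" then score
      else if PySem.Str.isIn k text then score + 1 else score) 0

-- ===== PORT B =====
def count_keyword_hits_py_alt (text : String) (keywords : List String) : Int :=
  if text = "" ∨ keywords = [] then 0
  else
    let counts : PySem.Dict String Int := keywords.foldl (fun d kw =>
      let k := PySem.Str.lower (PySem.Str.strip kw)
      if k = "" then d else d.insert k (d.getD k 0 + 1)) PySem.Dict.empty
    ((counts.items.filter (fun p => PySem.Str.isIn p.1 text)).map (·.2)).sum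

-- ===== PRECONDITION & SPEC =====
def Spec_count_keyword_hits_py (text : String) (keywords : List String) (out : Int) : Prop := out = count_keyword_hits_py_alt text keywords
instance (text : String) (keywords : List String) (out : Int) : Decidable (Spec_count_keyword_hits_py text keywords out) := by unfold Spec_count_keyword_hits_py; infer_instance

-- ===== CLAIM (what is proved, stated in full; the proofs are below) =====
def Claim_equal_count_keyword_hits_py : Prop := ∀ (text : String) (keywords : List String), Dom_count_keyword_hits_py text keywords → Spec_count_keyword_hits_py text keywords (count_keyword_hits_py text keywords)

-- ===== LEMMAS AND PROOFS =====

-- normalization applied to every keyword by both programs (proof-side abbreviation)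
def pvNorm (kw : String) : String := PySem.Str.lower (PySem.Str.strip kw)

-- A's fold over the raw keywords is an indicator sum over the nonempty normalized keywords
theorem pvA_fold_eq (text : String) : ∀ (l : List String) (s : Int),
    l.foldl (fun score keyword =>
      if PySem.Str.lower (PySem.Str.strip keyword) = "" then score
      else if PySem.Str.isIn (PySem.Str.lower (PySem.Str.strip keyword)) text then score + 1
      else score) s
    = s + (((l.map pvNorm).filter (fun k => !(k = ""))).map
        (fun k => if PySem.Str.isIn k text then (1 : Int) else 0)).sum := by
  intro l
  induction l with
  | nil => simp
  | cons x t ih =>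
    intro s
    rw [List.foldl_cons, List.map_cons, List.filter_cons]
    by_cases hx : PySem.Str.lower (PySem.Str.strip x) = ""
    · rw [if_pos hx]
      simp only [pvNorm, hx, decide_true, Bool.not_true]
      exact ih s
    · rw [if_neg hx]
      simp only [pvNorm, hx, decide_false, Bool.not_false, if_true, List.map_cons, List.sum_cons]
      by_cases hin : PySem.Str.isIn (PySem.Str.lower (PySem.Str.strip x)) text
      · rw [if_pos hin, if_pos hin, ih (s + 1)]; ring
      · rw [if_neg hin, if_neg hin, ih s]; ring

-- B's dict-building fold over the raw keywords is the counter fold over the same filtered list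
theorem pvB_fold_eq : ∀ (l : List String) (d : PySem.Dict String Int),
    l.foldl (fun d kw =>
      if PySem.Str.lower (PySem.Str.strip kw) = "" then d
      else d.insert (PySem.Str.lower (PySem.Str.strip kw))
        (d.getD (PySem.Str.lower (PySem.Str.strip kw)) 0 + 1)) d
    = ((l.map pvNorm).filter (fun k => !(k = ""))).foldl
        (fun d x => d.insert x (d.getD x 0 + 1)) d := by
  intro l
  induction l with
  | nil => simp
  | cons x t ih =>
    intro d
    rw [List.foldl_cons, List.map_cons, List.filter_cons]
    by_cases hx : PySem.Str.lower (PySem.Str.strip x) = ""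
    · rw [if_pos hx]
      simp only [pvNorm, hx, decide_true, Bool.not_true]
      exact ih d
    · rw [if_neg hx]
      simp only [pvNorm, hx, decide_false, Bool.not_false, if_true, List.foldl_cons]
      exact ih _

-- sum of the indicator (k = x) over a Nodup list
theorem pvSum_indicator (x : String) : ∀ (E : List String), E.Nodup →
    (E.map (fun k => if k = x then (1 : Int) else 0)).sum
    = if x ∈ E then (1 : Int) else 0 := by
  intro E
  induction E with
  | nil => simp
  | cons e t ih =>
    intro hnd
    simp only [List.nodup_cons] at hnd
    by_cases he : e = x
    · subst he
      simp [hnd.1, ih hnd.2]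
    · have : x ∈ e :: t ↔ x ∈ t := by simp [Ne.symm he]
      simp [he, ih hnd.2, this]

-- the key identity: summing multiplicities over the distinct hits equals counting hits one by one
theorem pvCount_sum (P : String → Bool) :
    ∀ (l D : List String), D.Nodup → (∀ x ∈ l, x ∈ D) →
    ((D.filter P).map (fun k => (l.count k : Int))).sum
    = (l.map (fun k => if P k then (1 : Int) else 0)).sum := by
  intro l
  induction l with
  | nil => intro D _ _; simp
  | cons x t ih =>
    intro D hnd hsub
    have hx : x ∈ D := hsub x (List.mem_cons_self ..)
    have hcnt : ∀ k : String, ((x :: t).count k : Int)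
        = (t.count k : Int) + (if k = x then (1 : Int) else 0) := by
      intro k
      rcases eq_or_ne k x with h | h
      · subst h; simp [List.count_cons_self]
      · simp [h, Ne.symm h]
    have hsplit : ((D.filter P).map (fun k => ((x :: t).count k : Int))).sum
        = ((D.filter P).map (fun k => (t.count k : Int))).sum
          + ((D.filter P).map (fun k => if k = x then (1 : Int) else 0)).sum := by
      rw [← List.sum_map_add]
      exact congrArg List.sum (List.map_congr_left (fun k _ => hcnt k))
    rw [hsplit, ih D hnd (fun y hy => hsub y (List.mem_cons_of_mem _ hy))]
    have hind : ((D.filter P).map (fun k => if k = x then (1 : Int) else 0)).sum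
        = if P x then (1 : Int) else 0 := by
      rw [pvSum_indicator x _ (hnd.filter P)]
      by_cases hPx : P x
      · simp [List.mem_filter, hx, hPx]
      · have : x ∉ D.filter P := by simp [List.mem_filter, hPx]
        simp [this, hPx]
    rw [hind]
    simp [List.map_cons, List.sum_cons]
    ring

-- projecting the values out of the filtered (key, value) pairs
theorem pvProj (text : String) (c : String → Int) (D : List String) :
    (((D.map (fun k => (k, c k))).filter (fun p => PySem.Str.isIn p.1 text)).map (fun x => x.2)).sum
    = ((D.filter (fun k => PySem.Str.isIn k text)).map c).sum := by
  induction D with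
  | nil => simp
  | cons d t ih =>
    simp only [List.map_cons, List.filter_cons]
    by_cases h : PySem.Str.isIn d text = true
    · rw [if_pos h, if_pos h, List.map_cons, List.map_cons, List.sum_cons, List.sum_cons, ih]
    · rw [if_neg h, if_neg h]
      simpa using ih

-- ===== VERDICT (by name: the statement is the Claim_ definition above) =====
theorem count_keyword_hits_py_spec : Claim_equal_count_keyword_hits_py := by
  intro text keywords _
  unfold Spec_count_keyword_hits_py count_keyword_hits_py count_keyword_hits_py_alt
  by_cases hguard : text = "" ∨ keywords = []
  · simp [hguard]
  · simp only [hguard, if_false]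
    rw [pvA_fold_eq, pvB_fold_eq]
    rw [PySem.Dict.foldl_insert_getD_add_one_eq_counter, PySem.Dict.items_counter]
    rw [pvProj]
    have := pvCount_sum (fun k => PySem.Str.isIn k text)
      ((keywords.map pvNorm).filter (fun k => !(k = "")))
      (PySem.Set.ofList ((keywords.map pvNorm).filter (fun k => !(k = ""))))
      (PySem.Set.nodup_ofList _) (fun x hx => (PySem.Set.mem_ofList ..).mpr hx)
    rw [zero_add]
    exact this.symm
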